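-- pv_equiv track=rewrite | github.com/boyuanzheng010/mmc | data_creation/annotation/adjudication/utils.py | extract_common_cluster
-- ===== SOURCE A (Python) =====
-- def extract_common_cluster(anno1, anno2):
--     clusters = []
--     for i in range(len(anno1)):
--         if anno1[i]!=anno2[i]:
--             continue
--         query = "_".join([str(x) for x in anno1[i][0]])
--         answer = "|".join(anno1[i][1])
--         if answer == "notMention":
--             continue
--
--         to_adds = [query]
--         if answer != "notPresent":
--             to_adds.append(answer)
--         signal = True
--         for cluster in clusters:
--             if len(set(to_adds)&set(cluster))!=0:
--                 cluster.extend(to_adds)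
--                 signal = False
--         if signal:
--             clusters.append(to_adds)
--
--     for i in range(len(clusters)):
--         clusters[i] = sorted(list(set(clusters[i])))
--
--     return clusters
-- ===== SOURCE B (Python) =====
-- def extract_common_cluster(anno1, anno2):
--     # Value->cluster-ids index replaces A's per-entry rescan of every cluster.
--     clusters = []
--     index = {}  # value -> set of ids of the clusters containing that value
--     for i in range(len(anno1)):
--         a = anno1[i]
--         if a != anno2[i]:
--             continue
--         query = "_".join(str(x) for x in a[0])
--         answer = "|".join(a[1])
--         if answer == "notMention":
--             continue
--         to_adds = [query] if answer == "notPresent" else [query, answer]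
--         hits = set()
--         for v in to_adds:
--             hits |= index.get(v, set())
--         if hits:
--             clusters = [c + to_adds if i in hits else c
--                         for i, c in enumerate(clusters)]
--             for v in to_adds:
--                 index.setdefault(v, set()).update(hits)
--         else:
--             cid = len(clusters)
--             clusters.append(list(to_adds))
--             for v in to_adds:
--                 index.setdefault(v, set()).add(cid)
--     return [sorted(set(c)) for c in clusters]
-- ===== Notes on version B (the rewrite author's own statement) =====
-- stated objective: alternative
-- what changed: B keeps a value->cluster-ids dictionary and looks overlapping clusters up by the (at most two) values of each entry, instead of A's rescan of every cluster with a set-intersection per entry.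
import Mathlib
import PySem

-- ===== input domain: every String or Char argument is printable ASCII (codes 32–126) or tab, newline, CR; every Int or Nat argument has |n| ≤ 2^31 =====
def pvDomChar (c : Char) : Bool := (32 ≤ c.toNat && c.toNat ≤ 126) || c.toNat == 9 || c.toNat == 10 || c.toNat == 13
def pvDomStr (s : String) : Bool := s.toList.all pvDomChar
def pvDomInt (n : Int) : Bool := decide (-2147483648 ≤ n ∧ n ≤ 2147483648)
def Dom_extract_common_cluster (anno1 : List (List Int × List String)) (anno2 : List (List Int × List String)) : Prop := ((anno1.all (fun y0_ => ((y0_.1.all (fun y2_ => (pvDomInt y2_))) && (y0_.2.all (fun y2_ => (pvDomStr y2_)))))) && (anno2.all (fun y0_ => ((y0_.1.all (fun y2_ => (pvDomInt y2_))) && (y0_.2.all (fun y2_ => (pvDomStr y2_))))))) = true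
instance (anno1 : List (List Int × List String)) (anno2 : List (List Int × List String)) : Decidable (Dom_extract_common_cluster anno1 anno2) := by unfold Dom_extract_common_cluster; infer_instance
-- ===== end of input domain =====

-- B keeps a value → cluster-ids index (dict of sets) and looks the overlapping cluster ids up
-- per entry, instead of A's set-intersection scan over every cluster (objective: an
-- alternative, index-based algorithm; not claimed as faster).

-- shared entry helpers: query = "_".join(str(x) for x in e[0]), answer = "|".join(e[1])
def pvQuery (e : List Int × List String) : String := PySem.Str.join "_" (e.1.map PySem.Int.toStr)
def pvAnswer (e : List Int × List String) : String := PySem.Str.join "|" e.2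

-- ===== PORT A =====
-- loop body of A's 'for i in range(len(anno1))' (a1 = anno1[i], a2 = anno2[i])
def pvABody (clusters : List (List String)) (a1 a2 : List Int × List String) : List (List String) :=
  if a1 ≠ a2 then clusters
  else
    let query := pvQuery a1
    let answer := pvAnswer a1
    if answer = "notMention" then clusters
    else
      let to_adds := if answer ≠ "notPresent" then [query, answer] else [query]
      -- 'for cluster in clusters: if len(set(to_adds)&set(cluster))!=0: cluster.extend(to_adds); signal=False'
      let res := clusters.foldl
        (fun (p : List (List String) × Bool) c =>
          if PySem.Set.len (PySem.Set.inter (PySem.Set.ofList to_adds) (PySem.Set.ofList c)) ≠ 0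
          then (p.1 ++ [c ++ to_adds], false)
          else (p.1 ++ [c], p.2)) ([], true)
      if res.2 then res.1 ++ [to_adds] else res.1

def extract_common_cluster (anno1 : List (List Int × List String)) (anno2 : List (List Int × List String)) : List (List String) :=
  let clusters :=
    (PySem.List.pyRange 0 anno1.length 1).foldl
      (fun clusters i =>
        pvABody clusters (PySem.List.pyGetD anno1 i ([], [])) (PySem.List.pyGetD anno2 i ([], []))) []
  -- clusters[i] = sorted(list(set(clusters[i])))
  clusters.map (fun c => PySem.List.sorted (PySem.Set.ofList c) (fun x => x) false)

-- ===== PORT B =====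
-- loop body of B's 'for i in range(len(anno1))' (a = anno1[i], b = anno2[i]);
-- state = (clusters, index : value -> set of cluster ids)
def pvBStep (st : List (List String) × PySem.Dict String (List Int))
    (ab : (List Int × List String) × (List Int × List String)) :
    List (List String) × PySem.Dict String (List Int) :=
  if ab.1 ≠ ab.2 then st
  else
    let query := pvQuery ab.1
    let answer := pvAnswer ab.1
    if answer = "notMention" then st
    else
      let to_adds := if answer = "notPresent" then [query] else [query, answer]
      -- hits = union of index.get(v, set()) over v in to_adds
      let hits : PySem.Set Int := to_adds.foldl (fun h v => PySem.Set.union h (st.2.getD v [])) []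
      if hits ≠ [] then
        ((PySem.List.enumerate st.1 0).map
           (fun ic => if PySem.Set.contains hits ic.1 then ic.2 ++ to_adds else ic.2),
         to_adds.foldl (fun ix v => ix.insert v (PySem.Set.union (ix.getD v []) hits)) st.2)
      else
        (st.1 ++ [to_adds],
         to_adds.foldl (fun ix v => ix.insert v (PySem.Set.add (ix.getD v []) (st.1.length : Int))) st.2)

def extract_common_cluster_alt (anno1 : List (List Int × List String)) (anno2 : List (List Int × List String)) : List (List String) :=
  let st :=
    (PySem.List.pyRange 0 anno1.length 1).foldl
      (fun st i =>
        pvBStep st (PySem.List.pyGetD anno1 i ([], []), PySem.List.pyGetD anno2 i ([], [])))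
      ([], PySem.Dict.mk [])
  st.1.map (fun c => PySem.List.sorted (PySem.Set.ofList c) (fun x => x) false)

-- ===== PRECONDITION & SPEC =====
-- Pre_ excludes exactly the inputs on which A raises IndexError (anno2 shorter than anno1,
-- so anno2[i] is missing); B raises IndexError there too.
def Pre_extract_common_cluster (anno1 : List (List Int × List String)) (anno2 : List (List Int × List String)) : Prop := anno1.length ≤ anno2.length
instance (anno1 : List (List Int × List String)) (anno2 : List (List Int × List String)) : Decidable (Pre_extract_common_cluster anno1 anno2) := by unfold Pre_extract_common_cluster; infer_instance
def pvWitness_extract_common_cluster : (List (List Int × List String)) × (List (List Int × List String)) := ([([1], ["a"])], [([1], ["a"])])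

def Spec_extract_common_cluster (anno1 : List (List Int × List String)) (anno2 : List (List Int × List String)) (out : List (List String)) : Prop := out = extract_common_cluster_alt anno1 anno2
instance (anno1 : List (List Int × List String)) (anno2 : List (List Int × List String)) (out : List (List String)) : Decidable (Spec_extract_common_cluster anno1 anno2 out) := by unfold Spec_extract_common_cluster; infer_instance

-- ===== CLAIM (what is proved, stated in full; the proofs are below) =====
def Claim_equal_extract_common_cluster : Prop := ∀ (anno1 : List (List Int × List String)) (anno2 : List (List Int × List String)), Dom_extract_common_cluster anno1 anno2 → Pre_extract_common_cluster anno1 anno2 → Spec_extract_common_cluster anno1 anno2 (extract_common_cluster anno1 anno2)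

-- ===== LEMMAS AND PROOFS =====

-- A's inner 'extend + signal' loop, in closed form
theorem pv_foldl_flag {α : Type} (P : α → Prop) [DecidablePred P] (g : α → α) :
    ∀ (l acc : List α) (s : Bool),
      l.foldl (fun (st : List α × Bool) c => if P c then (st.1 ++ [g c], false) else (st.1 ++ [c], st.2)) (acc, s)
      = (acc ++ l.map (fun c => if P c then g c else c), if ∃ c ∈ l, P c then false else s) := by
  intro l
  induction l with
  | nil => simp
  | cons x xs ih =>
    intro acc s
    by_cases hx : P x
    · simp only [List.foldl_cons, if_pos hx, ih]
      simp [hx]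
    · simp only [List.foldl_cons, if_neg hx, ih]
      simp [hx]

-- an index loop over range(len(l1)) is the fold over zip(l1, l2) when l1 is not longer
theorem pv_foldl_range_getD {α β σ : Type} (f : σ → α → β → σ) (d1 : α) (d2 : β) :
    ∀ (l1 : List α) (l2 : List β) (s : σ), l1.length ≤ l2.length →
      (List.range l1.length).foldl (fun s i => f s (l1.getD i d1) (l2.getD i d2)) s
      = (l1.zip l2).foldl (fun s p => f s p.1 p.2) s := by
  intro l1
  induction l1 with
  | nil => simp
  | cons a l1 ih =>
    intro l2 s hlen
    cases l2 with
    | nil => simp at hlen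
    | cons b l2 =>
      simp only [List.length_cons, List.range_succ_eq_map, List.foldl_cons, List.foldl_map,
        List.getD_cons_succ, List.getD_cons_zero, List.zip_cons_cons]
      exact ih l2 (f s a b) (by simpa using hlen)

-- the index invariant: ix maps each value to exactly the ids of the clusters containing it
def pvInv (cls : List (List String)) (ix : PySem.Dict String (List Int)) : Prop :=
  ∀ (v : String) (cid : Int), cid ∈ ix.getD v [] ↔ ∃ k : Nat, cid = (k : Int) ∧ k < cls.length ∧ v ∈ cls.getD k []

theorem pv_overlap_iff (ta c : List String) :
    PySem.Set.len (PySem.Set.inter (PySem.Set.ofList ta) (PySem.Set.ofList c)) ≠ 0 ↔ ∃ v ∈ ta, v ∈ c := by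
  have h : PySem.Set.len (PySem.Set.inter (PySem.Set.ofList ta) (PySem.Set.ofList c))
      = ((PySem.Set.inter (PySem.Set.ofList ta) (PySem.Set.ofList c)).length : Int) := rfl
  rw [h]
  constructor
  · intro hne
    have : (PySem.Set.inter (PySem.Set.ofList ta) (PySem.Set.ofList c)) ≠ [] := by
      intro hnil; rw [hnil] at hne; simp at hne
    obtain ⟨x, hx⟩ := List.exists_mem_of_ne_nil _ this
    rw [PySem.Set.mem_inter, PySem.Set.mem_ofList, PySem.Set.mem_ofList] at hx
    exact ⟨x, hx.1, hx.2⟩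
  · rintro ⟨v, hv, hvc⟩
    have : v ∈ PySem.Set.inter (PySem.Set.ofList ta) (PySem.Set.ofList c) := by
      rw [PySem.Set.mem_inter, PySem.Set.mem_ofList, PySem.Set.mem_ofList]; exact ⟨hv, hvc⟩
    have hlen : 0 < (PySem.Set.inter (PySem.Set.ofList ta) (PySem.Set.ofList c)).length :=
      List.length_pos_of_mem this
    omega

-- membership in B's 'hits' accumulator
theorem pv_hits_mem (ix : PySem.Dict String (List Int)) :
    ∀ (ta : List String) (acc : List Int) (cid : Int),
      cid ∈ ta.foldl (fun h v => PySem.Set.union h (ix.getD v [])) acc ↔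
        cid ∈ acc ∨ ∃ v ∈ ta, cid ∈ ix.getD v [] := by
  intro ta
  induction ta with
  | nil => simp
  | cons w ta ih =>
    intro acc cid
    simp only [List.foldl_cons, ih, PySem.Set.mem_union, List.mem_cons]
    constructor
    · rintro (⟨h | h⟩ | ⟨v, hv, h⟩)
      · exact Or.inl h
      · exact Or.inr ⟨w, Or.inl rfl, h⟩
      · exact Or.inr ⟨v, Or.inr hv, h⟩
    · rintro (h | ⟨v, hv | hv, h⟩)
      · exact Or.inl (Or.inl h)
      · exact Or.inl (Or.inr (hv ▸ h))
      · exact Or.inr ⟨v, hv, h⟩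

-- membership after B's '|= hits' index update
theorem pv_ix_union_mem (hits : List Int) :
    ∀ (ta : List String) (ix : PySem.Dict String (List Int)) (v : String) (cid : Int),
      cid ∈ (ta.foldl (fun ix v => ix.insert v (PySem.Set.union (ix.getD v []) hits)) ix).getD v [] ↔
        cid ∈ ix.getD v [] ∨ (v ∈ ta ∧ cid ∈ hits) := by
  intro ta
  induction ta with
  | nil => simp
  | cons w ta ih =>
    intro ix v cid
    simp only [List.foldl_cons, ih, PySem.Dict.getD_insert, List.mem_cons]
    by_cases hvw : v = w
    · subst hvw
      simp only [if_true, PySem.Set.mem_union, true_or, true_and]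
      tauto
    · simp only [if_neg hvw]
      tauto

-- membership after B's '.add(cid)' index update
theorem pv_ix_add_mem (n : Int) :
    ∀ (ta : List String) (ix : PySem.Dict String (List Int)) (v : String) (cid : Int),
      cid ∈ (ta.foldl (fun ix v => ix.insert v (PySem.Set.add (ix.getD v []) n)) ix).getD v [] ↔
        cid ∈ ix.getD v [] ∨ (v ∈ ta ∧ cid = n) := by
  intro ta
  induction ta with
  | nil => simp
  | cons w ta ih =>
    intro ix v cid
    simp only [List.foldl_cons, ih, PySem.Dict.getD_insert, List.mem_cons]
    by_cases hvw : v = w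
    · subst hvw
      simp only [if_true, PySem.Set.mem_add, true_or, true_and]
      tauto
    · simp only [if_neg hvw]
      tauto

theorem pv_step (cls : List (List String)) (ix : PySem.Dict String (List Int))
    (hInv : pvInv cls ix) (p : (List Int × List String) × (List Int × List String)) :
    pvABody cls p.1 p.2 = (pvBStep (cls, ix) p).1 ∧
      pvInv (pvBStep (cls, ix) p).1 (pvBStep (cls, ix) p).2 := by
  obtain ⟨a, b⟩ := p
  simp only [pvABody, pvBStep]
  by_cases hab : a = b
  case neg =>
    rw [if_pos hab, if_pos hab]
    exact ⟨rfl, hInv⟩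
  have hab' : ¬ (a ≠ b) := fun h => h hab
  rw [if_neg hab', if_neg hab']
  by_cases hm : pvAnswer a = "notMention"
  case pos =>
    rw [if_pos hm, if_pos hm]
    exact ⟨rfl, hInv⟩
  rw [if_neg hm, if_neg hm]
  have hta : (if ¬ pvAnswer a = "notPresent" then [pvQuery a, pvAnswer a] else [pvQuery a])
      = (if pvAnswer a = "notPresent" then [pvQuery a] else [pvQuery a, pvAnswer a]) := by
    by_cases h : pvAnswer a = "notPresent" <;> simp [h]
  rw [hta]
  generalize (if pvAnswer a = "notPresent" then [pvQuery a] else [pvQuery a, pvAnswer a]) = ta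
  rw [pv_foldl_flag (fun c => PySem.Set.len (PySem.Set.inter (PySem.Set.ofList ta) (PySem.Set.ofList c)) ≠ 0)
    (fun c => c ++ ta) cls [] true]
  set hits : List Int := ta.foldl (fun h v => PySem.Set.union h (ix.getD v [])) [] with hhits
  have Hhits : ∀ cid : Int, cid ∈ hits ↔ ∃ v ∈ ta, cid ∈ ix.getD v [] := by
    intro cid; rw [hhits, pv_hits_mem]; simp
  have HhitsIdx : ∀ cid : Int, cid ∈ hits ↔
      ∃ k : Nat, cid = (k : Int) ∧ k < cls.length ∧ ∃ v ∈ ta, v ∈ cls.getD k [] := by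
    intro cid
    rw [Hhits]
    constructor
    · rintro ⟨v, hv, hcid⟩
      obtain ⟨k, h1, h2, h3⟩ := (hInv v cid).1 hcid
      exact ⟨k, h1, h2, v, hv, h3⟩
    · rintro ⟨k, h1, h2, v, hv, h3⟩
      exact ⟨v, hv, (hInv v cid).2 ⟨k, h1, h2, h3⟩⟩
  have hcond : (∃ c ∈ cls, PySem.Set.len (PySem.Set.inter (PySem.Set.ofList ta) (PySem.Set.ofList c)) ≠ 0)
      ↔ ¬ hits = [] := by
    constructor
    · rintro ⟨c, hc, hP⟩
      rw [pv_overlap_iff] at hP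
      obtain ⟨v, hv, hvc⟩ := hP
      obtain ⟨k, hk, hkeq⟩ := List.mem_iff_getElem.1 hc
      have hmem : ((k : Nat) : Int) ∈ hits :=
        (HhitsIdx _).2 ⟨k, rfl, hk, v, hv, by rw [List.getD_eq_getElem cls [] hk, hkeq]; exact hvc⟩
      intro hnil
      rw [hnil] at hmem
      simp at hmem
    · intro hne
      obtain ⟨cid, hcid⟩ := List.exists_mem_of_ne_nil _ hne
      obtain ⟨k, h1, h2, v, hv, h3⟩ := (HhitsIdx cid).1 hcid
      refine ⟨cls.getD k [], ?_, (pv_overlap_iff _ _).2 ⟨v, hv, h3⟩⟩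
      rw [List.getD_eq_getElem cls [] h2]
      exact List.getElem_mem h2
  by_cases hnil : hits = []
  · -- no overlapping cluster: A appends a fresh cluster, B appends and indexes it
    have hnc : ¬ ∃ c ∈ cls, PySem.Set.len (PySem.Set.inter (PySem.Set.ofList ta) (PySem.Set.ofList c)) ≠ 0 := by
      rw [hcond]; exact fun h => h hnil
    have hid : cls.map (fun c => if PySem.Set.len (PySem.Set.inter (PySem.Set.ofList ta) (PySem.Set.ofList c)) ≠ 0
        then c ++ ta else c) = cls := by
      have h := List.map_congr_left (l := cls)
        (f := fun c => if PySem.Set.len (PySem.Set.inter (PySem.Set.ofList ta) (PySem.Set.ofList c)) ≠ 0 then c ++ ta else c)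
        (g := id) (fun c hc => by
          have hz : ¬ PySem.Set.len (PySem.Set.inter (PySem.Set.ofList ta) (PySem.Set.ofList c)) ≠ 0 :=
            fun hP => hnc ⟨c, hc, hP⟩
          change (if PySem.Set.len (PySem.Set.inter (PySem.Set.ofList ta) (PySem.Set.ofList c)) ≠ 0 then c ++ ta else c) = c
          exact if_neg hz)
      simpa using h
    rw [if_neg hnc, if_neg (not_not_intro hnil)]
    dsimp only
    rw [if_pos rfl]
    constructor
    · rw [List.nil_append, hid]
    · intro v cid
      rw [pv_ix_add_mem]
      constructor
      · rintro (h | ⟨hv, hcid⟩)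
        · obtain ⟨k, h1, h2, h3⟩ := (hInv v cid).1 h
          refine ⟨k, h1, by simp; omega, ?_⟩
          rw [List.getD_eq_getElem _ [] (by simp; omega)]
          rw [List.getD_eq_getElem cls [] h2] at h3
          simpa [List.getElem_append, h2] using h3
        · refine ⟨cls.length, hcid, by simp, ?_⟩
          rw [List.getD_eq_getElem _ [] (by simp)]
          simpa [List.getElem_append] using hv
      · rintro ⟨k, h1, h2, h3⟩
        simp only [List.length_append, List.length_cons, List.length_nil] at h2
        by_cases hk : k < cls.length
        · left
          apply (hInv v cid).2
          refine ⟨k, h1, hk, ?_⟩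
          rw [List.getD_eq_getElem _ [] (by simp; omega)] at h3
          rw [List.getD_eq_getElem cls [] hk]
          simpa [List.getElem_append, hk] using h3
        · right
          have hke : k = cls.length := by omega
          subst hke
          refine ⟨?_, by rw [h1]⟩
          rw [List.getD_eq_getElem _ [] (by simp)] at h3
          simpa [List.getElem_append] using h3
  · -- some clusters overlap: A extends them in place, B rebuilds them from the looked-up ids
    have hc : ∃ c ∈ cls, PySem.Set.len (PySem.Set.inter (PySem.Set.ofList ta) (PySem.Set.ofList c)) ≠ 0 := by
      rw [hcond]; exact hnil
    have hmap : (PySem.List.enumerate cls 0).map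
        (fun ic => if PySem.Set.contains hits ic.1 then ic.2 ++ ta else ic.2)
        = cls.map (fun c => if PySem.Set.len (PySem.Set.inter (PySem.Set.ofList ta) (PySem.Set.ofList c)) ≠ 0
            then c ++ ta else c) := by
      apply List.ext_getElem
      · simp [PySem.List.length_enumerate]
      · intro k h1 h2
        have hk : k < cls.length := by
          simpa [PySem.List.length_enumerate] using h1
        simp only [List.getElem_map,
          PySem.List.getElem_enumerate cls 0 k (by simpa [PySem.List.length_enumerate] using h1)]
        have hiff : PySem.Set.contains hits ((0 : Int) + (k : Int)) = true ↔
            PySem.Set.len (PySem.Set.inter (PySem.Set.ofList ta) (PySem.Set.ofList cls[k])) ≠ 0 := by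
          rw [PySem.Set.contains_iff, zero_add, HhitsIdx, pv_overlap_iff]
          constructor
          · rintro ⟨k', hkk', hk', hex⟩
            have hkeq : k = k' := by exact_mod_cast hkk'
            subst hkeq
            rwa [List.getD_eq_getElem cls [] hk] at hex
          · intro hex
            exact ⟨k, rfl, hk, by rwa [List.getD_eq_getElem cls [] hk]⟩
        by_cases hb : PySem.Set.contains hits ((0 : Int) + (k : Int)) = true
        · rw [if_pos hb, if_pos (hiff.1 hb)]
        · rw [if_neg (by simpa using hb), if_neg (fun hP => hb (hiff.2 hP))]
    rw [if_pos hc, if_pos hnil]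
    dsimp only
    rw [if_neg (by simp)]
    rw [hmap, List.nil_append]
    refine ⟨rfl, ?_⟩
    intro v cid
    rw [pv_ix_union_mem]
    have hlen : (cls.map (fun c => if PySem.Set.len (PySem.Set.inter (PySem.Set.ofList ta) (PySem.Set.ofList c)) ≠ 0
        then c ++ ta else c)).length = cls.length := by simp
    constructor
    · rintro (h | ⟨hv, hcid⟩)
      · obtain ⟨k, h1, h2, h3⟩ := (hInv v cid).1 h
        refine ⟨k, h1, by omega, ?_⟩
        rw [List.getD_eq_getElem _ [] (by rw [hlen]; omega), List.getElem_map]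
        rw [List.getD_eq_getElem cls [] h2] at h3
        split_ifs <;> simp [h3]
      · obtain ⟨k, h1, h2, hex⟩ := (HhitsIdx cid).1 hcid
        refine ⟨k, h1, by omega, ?_⟩
        rw [List.getD_eq_getElem _ [] (by rw [hlen]; omega), List.getElem_map]
        rw [if_pos (by rw [pv_overlap_iff]; rwa [List.getD_eq_getElem cls [] h2] at hex)]
        simp [hv]
    · rintro ⟨k, h1, h2, h3⟩
      rw [hlen] at h2
      rw [List.getD_eq_getElem _ [] (by rw [hlen]; omega), List.getElem_map] at h3
      by_cases hP : PySem.Set.len (PySem.Set.inter (PySem.Set.ofList ta) (PySem.Set.ofList cls[k])) ≠ 0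
      · rw [if_pos hP] at h3
        rcases List.mem_append.1 h3 with h4 | h4
        · left
          exact (hInv v cid).2 ⟨k, h1, h2, by rwa [List.getD_eq_getElem cls [] h2]⟩
        · right
          refine ⟨h4, (HhitsIdx cid).2 ⟨k, h1, h2, ?_⟩⟩
          rw [List.getD_eq_getElem cls [] h2]
          exact (pv_overlap_iff _ _).1 hP
      · rw [if_neg hP] at h3
        left
        exact (hInv v cid).2 ⟨k, h1, h2, by rwa [List.getD_eq_getElem cls [] h2]⟩

theorem pv_fold (l : List ((List Int × List String) × (List Int × List String))) :
    ∀ (cls : List (List String)) (ix : PySem.Dict String (List Int)), pvInv cls ix →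
      l.foldl (fun cls p => pvABody cls p.1 p.2) cls = (l.foldl pvBStep (cls, ix)).1 ∧
        pvInv (l.foldl pvBStep (cls, ix)).1 (l.foldl pvBStep (cls, ix)).2 := by
  induction l with
  | nil => intro cls ix h; exact ⟨rfl, h⟩
  | cons p l ih =>
    intro cls ix h
    obtain ⟨heq, hinv⟩ := pv_step cls ix h p
    have := ih (pvBStep (cls, ix) p).1 (pvBStep (cls, ix) p).2 hinv
    simp only [List.foldl_cons, heq]
    exact this

-- ===== VERDICT (by name: the statement is the Claim_ definition above) =====
theorem extract_common_cluster_spec : Claim_equal_extract_common_cluster := by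
  intro anno1 anno2 _ hpre
  unfold Spec_extract_common_cluster extract_common_cluster extract_common_cluster_alt
  have hInv0 : pvInv [] (PySem.Dict.mk []) := by
    intro v cid
    simp [PySem.Dict.getD, PySem.Dict.get?]
  have hrange : PySem.List.pyRange 0 (anno1.length : Int) 1
      = List.map (fun k : Nat => (k : Int)) (List.range anno1.length) :=
    PySem.List.pyRange_zero_natCast anno1.length
  rw [hrange, List.foldl_map, List.foldl_map]
  simp only [PySem.List.pyGetD_natCast]
  rw [pv_foldl_range_getD (fun cls a b => pvABody cls a b) ([], []) ([], []) anno1 anno2 [] hpre]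
  rw [pv_foldl_range_getD (fun st a b => pvBStep st (a, b)) ([], []) ([], [])
    anno1 anno2 ([], PySem.Dict.mk []) hpre]
  obtain ⟨heq, _⟩ := pv_fold (anno1.zip anno2) [] (PySem.Dict.mk []) hInv0
  rw [heq]
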